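-- pv_equiv track=rewrite | github.com/pypi-data/pypi-mirror-133 | packages/yawp/yawp-0.4.1-py3-none-any.whl/yawp/__main__.py | chapter_level
-- ===== SOURCE A (Python) =====
-- def chapter_level(line):
--     'return 1 2 3... for chapter titles, 0 otherwise'
--     status, level = 0, 0
--     for char in line:
--         if status == 0:
--             if '0' <= char <= '9': status = 1
--             else: break
--         elif status == 1:
--             if '0' <= char <= '9': status = 1
--             elif char == '.': level += 1; status = 2
--             else: break
--         elif status == 2:
--             if '0' <= char <= '9': status = 1
--             elif char == ' ': return level
--             else: break
--     return 0
-- ===== SOURCE B (Python) =====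
-- def chapter_level(line):
--     'return 1 2 3... for chapter titles, 0 otherwise'
--     parts = line.split(' ', 1)
--     head = parts[0]
--     if len(parts) == 2 and head.endswith('.'):
--         groups = head[:-1].split('.')
--         if all(g.isdigit() for g in groups):
--             return len(groups)
--     return 0
-- ===== Notes on version B (the rewrite author's own statement) =====
-- stated objective: idiomatic
-- what changed: Replaces the hand-written character state machine (status/level DFA with break/return) by a declarative parse: split off the text before the first space, require it to end with a dot, split it on dots and count the groups if all are non-empty digit runs.
import Mathlib
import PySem

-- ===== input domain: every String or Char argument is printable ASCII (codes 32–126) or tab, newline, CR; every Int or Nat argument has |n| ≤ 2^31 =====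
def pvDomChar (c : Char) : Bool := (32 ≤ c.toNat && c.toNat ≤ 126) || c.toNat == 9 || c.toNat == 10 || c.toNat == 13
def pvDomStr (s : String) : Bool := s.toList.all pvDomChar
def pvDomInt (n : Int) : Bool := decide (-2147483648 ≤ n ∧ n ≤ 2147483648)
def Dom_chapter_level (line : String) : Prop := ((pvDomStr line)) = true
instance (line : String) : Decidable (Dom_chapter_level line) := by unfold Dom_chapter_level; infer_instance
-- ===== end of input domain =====

-- B replaces A's character state machine by a declarative split-based parse of the same prefix grammar; objective: idiomatic, same cost.


-- ===== PORT A =====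
-- A's for-loop over the characters with its status/level state; `break` and falling off the loop give 0
def chapterLoop : List Char → Nat → Int → Int
  | [], _, _ => 0
  | c :: cs, status, level =>
    if status = 0 then
      if '0' ≤ c ∧ c ≤ '9' then chapterLoop cs 1 level else 0
    else if status = 1 then
      if '0' ≤ c ∧ c ≤ '9' then chapterLoop cs 1 level
      else if c = '.' then chapterLoop cs 2 (level + 1)
      else 0
    else
      if '0' ≤ c ∧ c ≤ '9' then chapterLoop cs 1 level
      else if c = ' ' then level
      else 0

def chapter_level (line : String) : Int := chapterLoop line.toList 0 0

-- ===== PORT B =====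
def chapter_level_alt (line : String) : Int :=
  let parts := PySem.Chars.splitOnMax line.toList [' '] 1        -- line.split(' ', 1)
  let head := parts.headD []                                     -- parts[0] (split never returns [])
  if parts.length = 2 && PySem.Chars.endswith head ['.'] then
    let groups := PySem.Chars.splitOn (PySem.Chars.slice head none (some (-1))) ['.']  -- head[:-1].split('.')
    if groups.all PySem.Chars.strIsdigit then (groups.length : Int) else 0
  else 0

-- ===== PRECONDITION & SPEC =====
def Spec_chapter_level (line : String) (out : Int) : Prop := out = chapter_level_alt line
instance (line : String) (out : Int) : Decidable (Spec_chapter_level line out) := by unfold Spec_chapter_level; infer_instance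

-- ===== CLAIM (what is proved, stated in full; the proofs are below) =====
def Claim_equal_chapter_level : Prop := ∀ (line : String), Dom_chapter_level line → Spec_chapter_level line (chapter_level line)

-- ===== LEMMAS AND PROOFS =====
-- ===== helpers =====
def splitD (d : Char) : List Char → List (List Char)
  | [] => [[]]
  | c :: l => if c = d then [] :: splitD d l else (splitD d l).modifyHead (c :: ·)

def BOopt (cs : List Char) : Option Int :=
  if ' ' ∈ cs then
    if PySem.Chars.endswith (cs.takeWhile (· ≠ ' ')) ['.'] then
      if (splitD '.' (cs.takeWhile (· ≠ ' ')).dropLast).all PySem.Chars.strIsdigit then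
        some ((splitD '.' (cs.takeWhile (· ≠ ' ')).dropLast).length : Int)
      else none
    else none
  else none

lemma splitD_ne_nil (d : Char) (l : List Char) : splitD d l ≠ [] := by
  induction l with
  | nil => simp [splitD]
  | cons c t ih =>
    by_cases h : c = d
    · simp [splitD, h]
    · simp only [splitD, if_neg h]
      cases hs : splitD d t with
      | nil => exact absurd hs ih
      | cons a as => simp

lemma go_eq (d : Char) : ∀ (fuel : Nat) (l cur : List Char) (acc : List (List Char)),
    l.length < fuel →
    PySem.Chars.splitOn.go [d] fuel l cur acc =
      acc.reverse ++ (splitD d l).modifyHead (cur.reverse ++ ·) := by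
  intro fuel
  induction fuel with
  | zero => intro l cur acc h; omega
  | succ f ih =>
    intro l cur acc h
    cases l with
    | nil =>
      rw [PySem.Chars.splitOn.go]
      · simp [splitD]
      · omega
    | cons c t =>
      rw [PySem.Chars.splitOn.go]
      by_cases hc : d = c
      · subst hc
        have hpre : List.isPrefixOf [d] (d :: t) = true := by simp [List.isPrefixOf]
        simp only [hpre, if_pos, List.length_singleton, List.drop_succ_cons, List.drop_zero]
        rw [ih t [] (cur.reverse :: acc) (by simp at h; omega)]
        have hmod : (splitD d t).modifyHead (List.reverse [] ++ ·) = splitD d t := by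
          cases splitD d t <;> simp
        rw [hmod]
        simp [splitD]
      · have hpre : List.isPrefixOf [d] (c :: t) = false := by
          simp only [List.isPrefixOf, List.isPrefixOf_nil_left, Bool.and_true, beq_iff_eq]
          exact decide_eq_false hc
        simp only [hpre, Bool.false_eq_true, if_neg, not_false_iff]
        rw [ih t (c :: cur) acc (by simp at h ⊢; omega)]
        have hcd : ¬ (c = d) := fun hh => hc hh.symm
        simp only [splitD, if_neg hcd]
        rw [List.modifyHead_modifyHead]
        congr 1
        cases splitD d t <;> simp

lemma splitOn_eq_splitD (d : Char) (l : List Char) :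
    PySem.Chars.splitOn l [d] = splitD d l := by
  rw [PySem.Chars.splitOn, go_eq d (l.length + 1) l [] [] (by omega)]
  cases splitD d l <;> simp

lemma go2_zero (d : Char) (fuel : Nat) (l cur : List Char) (acc : List (List Char)) :
    PySem.Chars.splitOnMax.go [d] fuel 0 l cur acc = ((cur.reverse ++ l) :: acc).reverse := by
  cases fuel with
  | zero => rw [PySem.Chars.splitOnMax.go]
  | succ f => cases l with
    | nil =>
      rw [PySem.Chars.splitOnMax.go]
      · simp
      · omega
    | cons c t => rw [PySem.Chars.splitOnMax.go]; simp

lemma go2_one (d : Char) : ∀ (fuel : Nat) (l cur : List Char) (acc : List (List Char)),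
    l.length < fuel →
    PySem.Chars.splitOnMax.go [d] fuel 1 l cur acc =
      acc.reverse ++ (if d ∈ l then [cur.reverse ++ l.takeWhile (· ≠ d), (l.dropWhile (· ≠ d)).tail]
        else [cur.reverse ++ l]) := by
  intro fuel
  induction fuel with
  | zero => intro l cur acc h; omega
  | succ f ih =>
    intro l cur acc h
    cases l with
    | nil =>
      rw [PySem.Chars.splitOnMax.go]
      · simp
      · omega
    | cons c t =>
      rw [PySem.Chars.splitOnMax.go]
      by_cases hc : d = c
      · subst hc
        have hpre : List.isPrefixOf [d] (d :: t) = true := by simp [List.isPrefixOf]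
        simp only [if_neg (by omega : ¬ (1 = 0)), hpre, if_pos, List.length_singleton,
          List.drop_succ_cons, List.drop_zero]
        rw [go2_zero]
        simp [List.takeWhile_cons, List.dropWhile_cons]
      · have hpre : List.isPrefixOf [d] (c :: t) = false := by
          simp only [List.isPrefixOf, List.isPrefixOf_nil_left, Bool.and_true, beq_iff_eq]
          exact decide_eq_false hc
        simp only [if_neg (by omega : ¬ (1 = 0)), hpre, Bool.false_eq_true, if_neg, not_false_iff]
        rw [ih t (c :: cur) acc (by simp at h ⊢; omega)]
        have hcd : ¬ (c = d) := fun hh => hc hh.symm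
        have hmem : (d ∈ c :: t) = (d ∈ t) := by simp [hc]
        by_cases hm : d ∈ t
        · simp [hm, hc, List.takeWhile_cons, List.dropWhile_cons, hcd]
        · simp [hm, hc, hcd]

lemma splitOnMax_one (cs : List Char) :
    PySem.Chars.splitOnMax cs [' '] 1 =
      if ' ' ∈ cs then [cs.takeWhile (· ≠ ' '), (cs.dropWhile (· ≠ ' ')).tail] else [cs] := by
  rw [PySem.Chars.splitOnMax]
  rw [if_neg (by omega : ¬ ((1:Int) < 0))]
  have : (1:Int).toNat = 1 := rfl
  rw [this, go2_one ' ' (cs.length + 1) cs [] [] (by omega)]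
  by_cases hm : ' ' ∈ cs <;> simp [hm]

lemma endswith_single (l : List Char) (d : Char) :
    PySem.Chars.endswith l [d] = true ↔ l.getLast? = some d := by
  rw [PySem.Chars.endswith, List.isSuffixOf_iff_suffix]
  constructor
  · rintro ⟨q, rfl⟩; simp
  · intro hg
    rcases List.eq_nil_or_concat l with rfl | ⟨q, z, rfl⟩
    · simp at hg
    · simp at hg; subst hg; exact ⟨q, by simp⟩

-- chapter_level_alt equals BOopt-based value
lemma alt_eq (line : String) :
    chapter_level_alt line = (BOopt line.toList).getD 0 := by
  unfold chapter_level_alt BOopt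
  rw [splitOnMax_one]
  by_cases hm : ' ' ∈ line.toList
  · have hslice : PySem.Chars.slice (line.toList.takeWhile (· ≠ ' ')) none (some (-1))
        = (line.toList.takeWhile (· ≠ ' ')).dropLast := by simp [pysem]
    simp only [if_pos hm, List.headD, List.length, hslice, splitOn_eq_splitD]
    split_ifs <;> simp_all
  · simp [if_neg hm]

lemma isdigit_iff (c : Char) : PySem.Chars.isdigit c = true ↔ ('0' ≤ c ∧ c ≤ '9') := by
  simp [PySem.Chars.isdigit]

lemma strIsdigit_true (l : List Char) (hne : l ≠ []) (h : ∀ c ∈ l, '0' ≤ c ∧ c ≤ '9') :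
    PySem.Chars.strIsdigit l = true := by
  simp [PySem.Chars.strIsdigit, List.isEmpty_iff, hne]
  intro c hc
  exact (isdigit_iff c).2 (h c hc)

lemma splitD_no_sep (d : Char) (l : List Char) (h : d ∉ l) : splitD d l = [l] := by
  induction l with
  | nil => rfl
  | cons c t ih =>
    simp at h
    rw [splitD, if_neg (fun hh => h.1 hh.symm), ih h.2]
    rfl

lemma splitD_append (d : Char) (ds x : List Char) (h : d ∉ ds) :
    splitD d (ds ++ d :: x) = ds :: splitD d x := by
  induction ds with
  | nil => simp [splitD]
  | cons c t ih =>
    simp at h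
    rw [List.cons_append, splitD, if_neg (fun hh => h.1 hh.symm), ih h.2]
    rfl

lemma splitD_all_digit (d : Char) (l : List Char)
    (h : (splitD d l).all (fun g => g.all PySem.Chars.isdigit) = true) :
    ∀ c ∈ l, c ≠ d → PySem.Chars.isdigit c = true := by
  induction l with
  | nil => simp
  | cons a t ih =>
    intro c hc hcd
    by_cases ha : a = d
    · rw [splitD, if_pos ha] at h
      simp at h hc
      rcases hc with rfl | hc
      · exact absurd ha hcd
      · exact ih (by simpa using h) c hc hcd
    · rw [splitD, if_neg ha] at h
      cases hs : splitD d t with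
      | nil => exact absurd hs (splitD_ne_nil d t)
      | cons g gs =>
        rw [hs] at h
        simp at h hc
        rcases hc with rfl | hc
        · exact h.1.1
        · exact ih (by simp [hs]; exact ⟨h.1.2, h.2⟩) c hc hcd

lemma all_strIsdigit_imp (gs : List (List Char))
    (h : gs.all PySem.Chars.strIsdigit = true) :
    gs.all (fun g => g.all PySem.Chars.isdigit) = true := by
  simp at h ⊢
  intro g hg
  have := h g hg
  simp [PySem.Chars.strIsdigit] at this
  exact this.2

lemma mem_dropLast_of (l : List Char) (c g : Char) (h : c ∈ l) (hg : l.getLast? = some g)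
    (hne : c ≠ g) : c ∈ l.dropLast := by
  rcases List.eq_nil_or_concat l with rfl | ⟨q, z, rfl⟩
  · simp at h
  · simp at hg
    subst hg
    simp at h ⊢
    tauto

lemma BOopt_none_of_endsfail (cs : List Char)
    (h : (cs.takeWhile (· ≠ ' ')).getLast? ≠ some '.') : BOopt cs = none := by
  unfold BOopt
  split_ifs with h1 h2 h3
  · exact absurd ((endswith_single _ _).1 h2) h
  · exact absurd ((endswith_single _ _).1 h2) h
  · rfl
  · rfl

lemma BOopt_none_of_bad (cs : List Char) (c : Char) (hc : c ∈ cs.takeWhile (· ≠ ' '))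
    (hnd : ¬ ('0' ≤ c ∧ c ≤ '9')) (hne : c ≠ '.') : BOopt cs = none := by
  unfold BOopt
  split_ifs with h1 h2 h3
  · exfalso
    have hlast := (endswith_single _ _).1 h2
    have hmem : c ∈ (cs.takeWhile (· ≠ ' ')).dropLast := mem_dropLast_of _ c '.' hc hlast hne
    have := splitD_all_digit '.' _ (all_strIsdigit_imp _ h3) c hmem hne
    exact hnd ((isdigit_iff c).1 this)
  · rfl
  · rfl
  · rfl

lemma BOopt_none_of_head_dot (cs : List Char)
    (h : (cs.takeWhile (· ≠ ' ')).head? = some '.') : BOopt cs = none := by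
  unfold BOopt
  split_ifs with h1 h2 h3
  · exfalso
    cases hhd : cs.takeWhile (· ≠ ' ') with
    | nil => rw [hhd] at h; simp at h
    | cons a t =>
      rw [hhd] at h
      simp at h
      subst h
      cases ht : t with
      | nil =>
        rw [hhd, ht] at h3
        simp [splitD, PySem.Chars.strIsdigit] at h3
      | cons b t2 =>
        rw [hhd, ht] at h3
        rw [List.dropLast_cons_of_ne_nil (by simp)] at h3
        rw [splitD, if_pos rfl] at h3
        simp [PySem.Chars.strIsdigit] at h3
  · rfl
  · rfl
  · rfl

lemma BOopt_none_of_no_space (cs : List Char) (h : ' ' ∉ cs) : BOopt cs = none := by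
  unfold BOopt
  rw [if_neg h]

lemma BOopt_step (ds r : List Char) (f : Char) (hds : ds ≠ [])
    (hdig : ∀ c ∈ ds, '0' ≤ c ∧ c ≤ '9') (hr : r.head? = some f) (hf : f ≠ ' ') :
    BOopt (ds ++ '.' :: r) = (BOopt r).map (· + 1) := by
  have hnosp : ∀ c ∈ ds, c ≠ ' ' := by
    intro c hc hcsp
    have := hdig c hc
    subst hcsp
    exact absurd this (by decide)
  have hnodot : '.' ∉ ds := by
    intro hdot
    have := hdig '.' hdot
    exact absurd this (by decide)
  by_cases hm : ' ' ∈ r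
  · -- space occurs in r
    have hmcs : ' ' ∈ ds ++ '.' :: r := by simp [hm]
    have htw : (ds ++ '.' :: r).takeWhile (· ≠ ' ')
        = ds ++ '.' :: r.takeWhile (· ≠ ' ') := by
      rw [List.takeWhile_append_of_pos (by intro a ha; simpa using hnosp a ha)]
      rw [List.takeWhile_cons, if_pos (by simp)]
    have hdrne : r.takeWhile (· ≠ ' ') ≠ [] := by
      cases r with
      | nil => simp at hr
      | cons a t =>
        simp at hr
        subst hr
        rw [List.takeWhile_cons, if_pos (by simpa using hf)]
        simp
    have hlast : (ds ++ '.' :: r.takeWhile (· ≠ ' ')).getLast?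
        = (r.takeWhile (· ≠ ' ')).getLast? := by
      rw [show ds ++ '.' :: r.takeWhile (· ≠ ' ') = (ds ++ ['.']) ++ r.takeWhile (· ≠ ' ') by simp]
      exact List.getLast?_append_of_ne_nil _ hdrne
    unfold BOopt
    rw [if_pos hmcs, if_pos hm, htw]
    by_cases hend : (r.takeWhile (· ≠ ' ')).getLast? = some '.'
    · rw [if_pos ((endswith_single _ _).2 (hlast.trans hend)),
        if_pos ((endswith_single _ _).2 hend)]
      have hdl : (ds ++ '.' :: r.takeWhile (· ≠ ' ')).dropLast
          = ds ++ '.' :: (r.takeWhile (· ≠ ' ')).dropLast := by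
        rw [List.dropLast_append_of_ne_nil (by simp), List.dropLast_cons_of_ne_nil hdrne]
      rw [hdl, splitD_append '.' ds _ hnodot]
      have hdsdig : PySem.Chars.strIsdigit ds = true := strIsdigit_true ds hds hdig
      by_cases hall : (splitD '.' (r.takeWhile (· ≠ ' ')).dropLast).all PySem.Chars.strIsdigit = true
      · rw [if_pos (by rw [List.all_cons, hdsdig, hall]; rfl), if_pos hall]
        simp only [List.length_cons, Option.map_some]
        norm_cast
      · rw [if_neg (by rw [List.all_cons, hdsdig, Bool.true_and]; exact hall), if_neg hall]
        rfl
    · rw [if_neg (fun hh => hend (hlast ▸ (endswith_single _ _).1 hh)),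
        if_neg (fun hh => hend ((endswith_single _ _).1 hh))]
      rfl
  · -- no space anywhere
    have hmcs : ' ' ∉ ds ++ '.' :: r := by
      simp [hm]
      intro hc
      exact hnosp ' ' hc rfl
    rw [BOopt_none_of_no_space _ hmcs, BOopt_none_of_no_space _ hm]
    rfl

lemma dropWhile_head_false (p : Char → Bool) (l : List Char) (c : Char)
    (h : (l.dropWhile p).head? = some c) : p c = false := by
  induction l with
  | nil => simp at h
  | cons a t ih =>
    by_cases hp : p a
    · simp [hp] at h; exact ih h
    · simp [hp] at h; subst h; simpa using hp

lemma loop_nil (st : Nat) (level : Int) : chapterLoop [] st level = 0 := rfl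

lemma loop0_digit (c : Char) (cs : List Char) (level : Int) (h : '0' ≤ c ∧ c ≤ '9') :
    chapterLoop (c :: cs) 0 level = chapterLoop cs 1 level := by
  simp [chapterLoop, h]

lemma loop1_dot (cs : List Char) (level : Int) :
    chapterLoop ('.' :: cs) 1 level = chapterLoop cs 2 (level + 1) := by
  simp [chapterLoop]

lemma loop1_break (c : Char) (cs : List Char) (level : Int)
    (h1 : ¬ ('0' ≤ c ∧ c ≤ '9')) (h2 : c ≠ '.') : chapterLoop (c :: cs) 1 level = 0 := by
  simp [chapterLoop, h1, h2]

lemma loop2_space (cs : List Char) (level : Int) :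
    chapterLoop (' ' :: cs) 2 level = level := by
  simp [chapterLoop]

lemma loop2_digit (c : Char) (cs : List Char) (level : Int) (h : '0' ≤ c ∧ c ≤ '9') :
    chapterLoop (c :: cs) 2 level = chapterLoop cs 1 level := by
  simp [chapterLoop, h]

lemma loop2_break (c : Char) (cs : List Char) (level : Int)
    (h1 : ¬ ('0' ≤ c ∧ c ≤ '9')) (h2 : c ≠ ' ') : chapterLoop (c :: cs) 2 level = 0 := by
  simp [chapterLoop, h1, h2]

lemma loop1_digits (ds : List Char) (h : ∀ c ∈ ds, '0' ≤ c ∧ c ≤ '9')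
    (rest : List Char) (level : Int) :
    chapterLoop (ds ++ rest) 1 level = chapterLoop rest 1 level := by
  induction ds with
  | nil => rfl
  | cons c t ih =>
    have hc := h c (by simp)
    rw [List.cons_append]
    show chapterLoop (c :: (t ++ rest)) 1 level = _
    simp only [chapterLoop, if_pos hc, if_neg (by omega : ¬ (1 = 0)), if_pos rfl]
    exact ih (fun x hx => h x (by simp [hx]))

lemma main_loop : ∀ (n : Nat) (cs : List Char), cs.length ≤ n → ∀ level : Int,
    chapterLoop cs 0 level = (match BOopt cs with | some k => level + k | none => 0) := by
  intro n
  induction n with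
  | zero =>
    intro cs h level
    have : cs = [] := List.eq_nil_of_length_eq_zero (by omega)
    subst this
    rw [BOopt_none_of_no_space [] (by simp)]
    rfl
  | succ n ih =>
    intro cs hlen level
    cases cs with
    | nil =>
      rw [BOopt_none_of_no_space [] (by simp)]
      rfl
    | cons c cs' =>
      by_cases hd0 : '0' ≤ c ∧ c ≤ '9'
      · -- leading digit: split off the maximal digit run
        have hsplit : (c :: cs') = (c :: cs').takeWhile (fun x => decide ('0' ≤ x ∧ x ≤ '9'))
            ++ (c :: cs').dropWhile (fun x => decide ('0' ≤ x ∧ x ≤ '9')) :=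
          (List.takeWhile_append_dropWhile).symm
        set ds := (c :: cs').takeWhile (fun x => decide ('0' ≤ x ∧ x ≤ '9')) with hds_def
        set rest := (c :: cs').dropWhile (fun x => decide ('0' ≤ x ∧ x ≤ '9')) with hrest_def
        have hds_cons : ds = c :: cs'.takeWhile (fun x => decide ('0' ≤ x ∧ x ≤ '9')) := by
          rw [hds_def, List.takeWhile_cons, if_pos (by simpa using hd0)]
        have hdsne : ds ≠ [] := by rw [hds_cons]; simp
        have hdig : ∀ x ∈ ds, '0' ≤ x ∧ x ≤ '9' := by
          intro x hx
          rw [hds_def] at hx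
          simpa using List.mem_takeWhile_imp hx
        have hnosp : ∀ x ∈ ds, x ≠ ' ' := by
          intro x hx hsp
          have := hdig x hx
          subst hsp
          exact absurd this (by decide)
        have hA : chapterLoop (c :: cs') 0 level = chapterLoop rest 1 level := by
          conv_lhs => rw [hsplit, hds_cons]
          rw [List.cons_append, loop0_digit _ _ _ hd0]
          exact loop1_digits _ (fun x hx => by simpa using List.mem_takeWhile_imp hx) _ _
        cases hr : rest with
        | nil =>
          rw [hA, hr, loop_nil]
          rw [BOopt_none_of_no_space (c :: cs') (by
            rw [hsplit, hr, List.append_nil]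
            intro hsp
            exact hnosp ' ' hsp rfl)]
        | cons e r =>
          have hend : (fun x => decide ('0' ≤ x ∧ x ≤ '9')) e = false :=
            dropWhile_head_false _ (c :: cs') e (by rw [← hrest_def, hr]; rfl)
          have hnd : ¬ ('0' ≤ e ∧ e ≤ '9') := by simpa using hend
          by_cases hedot : e = '.'
          · subst hedot
            cases r with
            | nil =>
              rw [hA, hr, loop1_dot, loop_nil]
              rw [BOopt_none_of_no_space (c :: cs') (by
                rw [hsplit, hr]
                simp
                intro hsp
                exact hnosp ' ' hsp rfl)]
            | cons f r2 =>
              by_cases hfsp : f = ' '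
              · subst hfsp
                rw [hA, hr, loop1_dot, loop2_space]
                have hBO : BOopt (c :: cs') = some 1 := by
                  rw [hsplit, hr]
                  unfold BOopt
                  have htw : (ds ++ '.' :: ' ' :: r2).takeWhile (· ≠ ' ') = ds ++ ['.'] := by
                    rw [List.takeWhile_append_of_pos (by
                      intro a ha; simpa using hnosp a ha)]
                    rw [List.takeWhile_cons, if_pos (by simp), List.takeWhile_cons,
                      if_neg (by simp)]
                  rw [if_pos (by simp), htw]
                  rw [if_pos ((endswith_single _ _).2 (by simp))]
                  rw [show (ds ++ ['.']).dropLast = ds by simp]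
                  rw [splitD_no_sep '.' ds (by
                    intro hdot
                    exact absurd (hdig '.' hdot) (by decide))]
                  rw [if_pos (by
                    simp only [List.all_cons, List.all_nil, Bool.and_true]
                    exact strIsdigit_true ds hdsne hdig)]
                  rfl
                rw [hBO]
              · -- f is not a space: the head continues past the dot
                have hBstep : BOopt (c :: cs') = (BOopt (f :: r2)).map (· + 1) := by
                  rw [hsplit, hr]
                  exact BOopt_step ds (f :: r2) f hdsne hdig rfl hfsp
                by_cases hfd : '0' ≤ f ∧ f ≤ '9'
                · have hlen2 : (f :: r2).length ≤ n := by
                    have hl := congrArg List.length hsplit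
                    rw [hr] at hl
                    simp at hl hlen
                    have : 1 ≤ ds.length := by
                      cases hds : ds with
                      | nil => exact absurd hds hdsne
                      | cons a t => simp
                    simp only [List.length_cons]
                    omega
                  rw [hA, hr, loop1_dot, loop2_digit _ _ _ hfd, ← loop0_digit _ _ _ hfd,
                    ih (f :: r2) hlen2 (level + 1), hBstep]
                  cases BOopt (f :: r2) with
                  | none => rfl
                  | some k => simp; ring
                · have hBnone : BOopt (f :: r2) = none := by
                    by_cases hfdot : f = '.'
                    · apply BOopt_none_of_head_dot
                      rw [List.takeWhile_cons, if_pos (by simpa using hfsp)]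
                      simp [hfdot]
                    · apply BOopt_none_of_bad _ f _ hfd hfdot
                      rw [List.takeWhile_cons, if_pos (by simpa using hfsp)]
                      simp
                  rw [hA, hr, loop1_dot, loop2_break _ _ _ hfd hfsp, hBstep, hBnone]
                  rfl
          · -- the character after the digits is neither '.' nor a digit
            rw [hA, hr, loop1_break _ _ _ hnd hedot]
            by_cases hesp : e = ' '
            · subst hesp
              rw [BOopt_none_of_endsfail (c :: cs') (by
                rw [hsplit, hr]
                rw [List.takeWhile_append_of_pos (by intro a ha; simpa using hnosp a ha)]
                rw [List.takeWhile_cons, if_neg (by simp), List.append_nil]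
                intro hlast
                have hmem : '.' ∈ ds := List.mem_of_getLast? hlast
                exact absurd (hdig '.' hmem) (by decide))]
            · rw [BOopt_none_of_bad (c :: cs') e (by
                rw [hsplit, hr]
                rw [List.takeWhile_append_of_pos (by intro a ha; simpa using hnosp a ha)]
                rw [List.takeWhile_cons, if_pos (by simpa using hesp)]
                simp) hnd hedot]
      · -- head is not a digit: the machine breaks at once, and B never matches
        have hA0 : chapterLoop (c :: cs') 0 level = 0 := by
          simp [chapterLoop, hd0]
        by_cases hcsp : c = ' '
        · subst hcsp
          rw [hA0, BOopt_none_of_endsfail (' ' :: cs') (by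
            rw [List.takeWhile_cons, if_neg (by simp)]
            simp)]
        · by_cases hcdot : c = '.'
          · subst hcdot
            rw [hA0, BOopt_none_of_head_dot ('.' :: cs') (by
              rw [List.takeWhile_cons, if_pos (by simpa using hcsp)]
              simp)]
          · rw [hA0, BOopt_none_of_bad (c :: cs') c (by
              rw [List.takeWhile_cons, if_pos (by simpa using hcsp)]
              simp) hd0 hcdot]

lemma chapter_level_eq_alt (line : String) : chapter_level line = chapter_level_alt line := by
  rw [chapter_level, alt_eq, main_loop line.toList.length line.toList le_rfl 0]
  cases BOopt line.toList with
  | none => rfl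
  | some k => simp

-- ===== VERDICT (by name: the statement is the Claim_ definition above) =====
theorem chapter_level_spec : Claim_equal_chapter_level := by
  intro line _
  unfold Spec_chapter_level
  exact chapter_level_eq_alt line
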